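-- pv_equiv track=rewrite | github.com/21A91A04H0surya/owlcoder | 926-find-and-replace-pattern/find-and-replace-pattern.py | pat
-- ===== SOURCE A (Python) =====
-- def pat(s):
--     res=[]
--     dic={}
--     k=0
--     for i in s:
--         if i in dic:
--             res.append(dic[i])
--         else:
--             k+=1
--             dic[i]=k
--             res.append(k)
--     return res
-- ===== SOURCE B (Python) =====
-- def pat(s):
--     return _pat(list(s))
--
-- def _pat(l):
--     # Recursive peeling: every occurrence of the earliest character gets label 1;
--     # remove them all, pattern the remainder recursively, shift its labels by 1,
--     # and interleave the two label streams back in position order.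
--     if not l:
--         return []
--     c = l[0]
--     sub = _pat([ch for ch in l if ch != c])
--     out = []
--     j = 0
--     for ch in l:
--         if ch == c:
--             out.append(1)
--         else:
--             out.append(sub[j] + 1)
--             j += 1
--     return out
-- ===== Notes on version B (the rewrite author's own statement) =====
-- stated objective: alternative
-- what changed: Replaces A's single dict-and-counter pass with a recursion on the set of distinct characters: label all occurrences of the earliest character 1, delete them, recursively pattern the remaining string, add 1 to its labels and interleave them back; no dictionary or counter at all.
import Mathlib
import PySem

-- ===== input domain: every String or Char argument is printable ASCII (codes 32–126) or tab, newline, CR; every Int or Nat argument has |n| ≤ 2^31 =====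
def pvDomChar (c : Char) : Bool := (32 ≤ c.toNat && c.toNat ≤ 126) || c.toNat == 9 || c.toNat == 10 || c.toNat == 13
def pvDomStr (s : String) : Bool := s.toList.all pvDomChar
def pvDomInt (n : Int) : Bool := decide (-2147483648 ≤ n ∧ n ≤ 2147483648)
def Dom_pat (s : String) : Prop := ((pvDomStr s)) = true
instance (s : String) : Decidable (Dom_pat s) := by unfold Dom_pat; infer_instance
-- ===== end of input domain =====

-- B replaces A's dict-and-counter pass with a recursion peeling off the earliest character (alternative algorithm, not faster).

-- ===== PORT A =====
-- A's loop: res accumulator, dict of seen chars, counter k.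
-- 'dic[i]' is only read when 'i in dic', so the total 'getD _ 0' is exact here.
def patLoop : List Char → List Int → PySem.Dict Char Int → Int → List Int
  | [], res, _, _ => res
  | c :: rest, res, dic, k =>
    if dic.contains c then patLoop rest (res ++ [dic.getD c 0]) dic k
    else patLoop rest (res ++ [k + 1]) (dic.insert c (k + 1)) (k + 1)

def pat (s : String) : List Int := patLoop s.toList [] PySem.Dict.empty 0

-- ===== PORT B =====
-- Source B's interleaving loop: 'sub[j]; j += 1' reads sub sequentially, modelled by consuming the list;
-- 'sub[j]' never goes out of range in Source B (one unread label per non-c char), so 'headD 0' is exact here.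
def patMerge (c : Char) : List Char → List Int → List Int
  | [], _ => []
  | ch :: rest, sub =>
    if ch = c then 1 :: patMerge c rest sub
    else (sub.headD 0 + 1) :: patMerge c rest sub.tail

-- Source B's _pat: peel off the first character c, recurse on the string with c removed, re-interleave.
def patGo (l : List Char) : List Int :=
  match l with
  | [] => []
  | c :: t =>
    let sub := patGo ((c :: t).filter (fun ch => ch ≠ c))
    patMerge c (c :: t) sub
termination_by l.length
decreasing_by
  rw [List.filter_cons, if_neg (by simp)]
  exact Nat.lt_succ_of_le (List.length_filter_le _ _)

def pat_alt (s : String) : List Int := patGo s.toList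

-- ===== PRECONDITION & SPEC =====
def Spec_pat (s : String) (out : List Int) : Prop := out = pat_alt s
instance (s : String) (out : List Int) : Decidable (Spec_pat s out) := by unfold Spec_pat; infer_instance

-- ===== CLAIM (what is proved, stated in full; the proofs are below) =====
def Claim_equal_pat : Prop := ∀ (s : String), Dom_pat s → Spec_pat s (pat s)

-- ===== LEMMAS AND PROOFS =====

/-- Rank of a char in a first-occurrence list: 1-based index. -/
def rankIn (l : List Char) (c : Char) : Int := (((PySem.List.index? l c).getD 0 : Nat) : Int) + 1

lemma update_append (l s : List Char) : ∃ t, PySem.Set.update s l = s ++ t := by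
  induction l generalizing s with
  | nil => exact ⟨[], by simp [PySem.Set.update]⟩
  | cons x l ih =>
    have hstep : PySem.Set.update s (x :: l) = PySem.Set.update (PySem.Set.add s x) l := rfl
    by_cases hx : x ∈ s
    · have : PySem.Set.add s x = s := by simp [PySem.Set.add, PySem.Set.contains, hx]
      rw [hstep, this]; exact ih s
    · have : PySem.Set.add s x = s ++ [x] := by simp [PySem.Set.add, PySem.Set.contains, hx]
      rw [hstep, this]
      obtain ⟨t, ht⟩ := ih (s ++ [x])
      exact ⟨[x] ++ t, by simp [ht]⟩

lemma index?_update_of_mem (s l : List Char) (c : Char) (hc : c ∈ s) :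
    PySem.List.index? (PySem.Set.update s l) c = PySem.List.index? s c := by
  obtain ⟨t, ht⟩ := update_append l s
  rw [ht, PySem.List.index?_append_of_mem t hc]

lemma patLoop_eq (rest : List Char) : ∀ (seen : List Char) (dic : PySem.Dict Char Int)
    (res : List Int), seen.Nodup →
    (∀ x, dic.get? x = (PySem.List.index? seen x).map (fun n => ((n : Int) + 1))) →
    patLoop rest res dic (seen.length : Int) =
      res ++ rest.map (rankIn (PySem.Set.update seen rest)) := by
  induction rest with
  | nil => intro seen dic res _ _; simp [patLoop]
  | cons c rest ih =>
    intro seen dic res hnd h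
    have hstep : PySem.Set.update seen (c :: rest)
        = PySem.Set.update (PySem.Set.add seen c) rest := rfl
    by_cases hc : c ∈ seen
    · obtain ⟨n, hn⟩ : ∃ n, PySem.List.index? seen c = some n :=
        Option.isSome_iff_exists.mp ((PySem.List.index?_isSome_iff seen c).mpr hc)
      have hcont : dic.contains c = true := by
        rw [PySem.Dict.contains_eq_isSome_get?, h c, hn]; rfl
      have hadd : PySem.Set.add seen c = seen := by
        simp [PySem.Set.add, PySem.Set.contains, hc]
      have hget : dic.getD c 0 = (n : Int) + 1 := by
        rw [PySem.Dict.getD_eq_get?_getD, h c, hn]; rfl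
      have hhead : rankIn (PySem.Set.update seen rest) c = (n : Int) + 1 := by
        rw [rankIn, index?_update_of_mem seen rest c hc, hn]; rfl
      rw [hstep, hadd]
      simp only [patLoop, hcont, if_true, hget]
      rw [ih seen dic (res ++ [(n : Int) + 1]) hnd h]
      simp [hhead]
    · have hcont : dic.contains c = false := by
        rw [PySem.Dict.contains_eq_isSome_get?, h c,
            (PySem.List.index?_eq_none_iff (xs := seen) (v := c)).mpr hc]
        rfl
      have hnd' : (seen ++ [c]).Nodup := by
        refine List.Nodup.append hnd (List.nodup_singleton c) ?_
        intro a ha hb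
        simp only [List.mem_singleton] at hb
        exact hc (hb ▸ ha)
      have hadd : PySem.Set.add seen c = seen ++ [c] := by
        simp [PySem.Set.add, PySem.Set.contains, hc]
      have h' : ∀ x, (dic.insert c ((seen.length : Int) + 1)).get? x
          = (PySem.List.index? (seen ++ [c]) x).map (fun n => ((n : Int) + 1)) := by
        intro x
        rw [PySem.Dict.get?_insert]
        by_cases hx : x = c
        · subst hx
          rw [if_pos rfl, PySem.List.index?_append_singleton_self seen x hc]
          simp
        · rw [if_neg hx, h x]
          by_cases hxm : x ∈ seen
          · rw [PySem.List.index?_append_of_mem [c] hxm]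
          · rw [(PySem.List.index?_eq_none_iff (xs := seen) (v := x)).mpr hxm,
                (PySem.List.index?_eq_none_iff (xs := seen ++ [c]) (v := x)).mpr (by
                  simp [hxm, hx])]
      have hlen : ((seen.length : Int) + 1) = (((seen ++ [c]).length : Nat) : Int) := by
        simp
      have hhead : rankIn (PySem.Set.update (seen ++ [c]) rest) c
          = (seen.length : Int) + 1 := by
        rw [rankIn, index?_update_of_mem (seen ++ [c]) rest c (by simp),
            PySem.List.index?_append_singleton_self seen c hc]
        rfl
      have hrec := ih (seen ++ [c]) (dic.insert c ((seen.length : Int) + 1))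
        (res ++ [(seen.length : Int) + 1]) hnd' h'
      rw [← hlen] at hrec
      rw [hstep, hadd]
      simp only [patLoop, hcont, Bool.false_eq_true, if_false]
      rw [hrec]
      simp [hhead]

lemma pat_eq (s : String) : pat s = s.toList.map (rankIn (PySem.List.dedup s.toList)) := by
  have h0 : pat s = patLoop s.toList [] PySem.Dict.empty ((([] : List Char).length : Nat) : Int) := rfl
  rw [h0, patLoop_eq s.toList [] PySem.Dict.empty [] List.nodup_nil (by
    intro x
    rw [PySem.Dict.get?_empty,
        (PySem.List.index?_eq_none_iff (xs := ([] : List Char)) (v := x)).mpr (by simp)]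
    rfl)]
  have hupd : PySem.Set.update ([] : List Char) s.toList = PySem.List.dedup s.toList := rfl
  simp [hupd]

-- B-side lemmas -------------------------------------------------------------

/-- Built-up-set elements already present may be filtered out of the update list. -/
lemma update_filter_of_mem (h : Char) : ∀ (l s : List Char), h ∈ s →
    PySem.Set.update s l = PySem.Set.update s (l.filter (fun ch => ch ≠ h)) := by
  intro l
  induction l with
  | nil => intro s _; rfl
  | cons x l ih =>
    intro s hs
    by_cases hx : x = h
    · subst hx
      have hadd : PySem.Set.add s x = s := by
        simp [PySem.Set.add, PySem.Set.contains, hs]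
      show PySem.Set.update (PySem.Set.add s x) l = _
      rw [hadd, List.filter_cons]
      simp only [ne_eq, not_true_eq_false, decide_false, Bool.false_eq_true, if_false]
      exact ih s hs
    · have hmem : h ∈ PySem.Set.add s x := by
        by_cases hm : x ∈ s <;> simp [PySem.Set.add, PySem.Set.contains, hm, hs]
      show PySem.Set.update (PySem.Set.add s x) l = _
      rw [List.filter_cons]
      simp only [ne_eq, hx, not_false_eq_true, decide_true, if_true]
      exact ih (PySem.Set.add s x) hmem

/-- With `x` absent from `l`, a leading `x` in the seen set just passes through. -/
lemma update_cons_notmem (x : Char) : ∀ (l s : List Char), x ∉ l →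
    PySem.Set.update (x :: s) l = x :: PySem.Set.update s l := by
  intro l
  induction l with
  | nil => intro s _; rfl
  | cons y l ih =>
    intro s hx
    have hyx : y ≠ x := fun h => hx (h ▸ List.mem_cons_self)
    have hadd : PySem.Set.add (x :: s) y = x :: PySem.Set.add s y := by
      by_cases hm : y ∈ s <;>
        simp [PySem.Set.add, PySem.Set.contains, hm, hyx]
    show PySem.Set.update (PySem.Set.add (x :: s) y) l = _
    rw [hadd, ih (PySem.Set.add s y) (fun h => hx (List.mem_cons_of_mem y h))]
    rfl

/-- First-occurrence dedup peels its head: the tail is the dedup of the rest with the head removed. -/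
lemma dedup_cons (c : Char) (t : List Char) :
    PySem.List.dedup (c :: t) = c :: PySem.List.dedup (t.filter (fun ch => ch ≠ c)) := by
  have h0 : PySem.List.dedup (c :: t) = PySem.Set.update [c] t := by
    show PySem.Set.update (PySem.Set.add [] c) t = _
    rfl
  have h1 : PySem.List.dedup (t.filter (fun ch => ch ≠ c))
      = PySem.Set.update [] (t.filter (fun ch => ch ≠ c)) := rfl
  rw [h0, update_filter_of_mem c t [c] List.mem_cons_self,
      update_cons_notmem c (t.filter (fun ch => ch ≠ c)) [] (by simp), h1]

/-- The interleaving loop applied to the mapped filtered list re-creates a map over the whole list. -/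
lemma patMerge_map (c : Char) (g : Char → Int) : ∀ (l : List Char),
    patMerge c l ((l.filter (fun ch => ch ≠ c)).map g)
      = l.map (fun ch => if ch = c then 1 else g ch + 1) := by
  intro l
  induction l with
  | nil => rfl
  | cons x l ih =>
    by_cases hx : x = c
    · subst hx
      rw [List.filter_cons, if_neg (by simp)]
      show (if x = x then 1 :: patMerge x l _ else _) = _
      rw [if_pos rfl, List.map_cons, if_pos rfl, ih]
    · rw [List.filter_cons, if_pos (by simp [hx]), List.map_cons]
      show (if x = c then _ else ((g x :: (l.filter (fun ch => ch ≠ c)).map g).headD 0 + 1)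
          :: patMerge c l (g x :: (l.filter (fun ch => ch ≠ c)).map g).tail) = _
      rw [if_neg hx, List.map_cons, if_neg hx, List.headD_cons, List.tail_cons, ih]

lemma patGo_eq : ∀ (l : List Char), patGo l = l.map (rankIn (PySem.List.dedup l)) := by
  intro l
  induction hn : l.length using Nat.strong_induction_on generalizing l with
  | _ n ih =>
  match l with
  | [] => simp [patGo]
  | c :: t =>
    have hfl : (c :: t).filter (fun ch => ch ≠ c) = t.filter (fun ch => ch ≠ c) := by
      rw [List.filter_cons]
      simp
    have hlt : (t.filter (fun ch => ch ≠ c)).length < n := by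
      subst hn
      exact Nat.lt_succ_of_le (List.length_filter_le _ _)
    have hsub := ih _ hlt (t.filter (fun ch => ch ≠ c)) rfl
    have hgo : patGo (c :: t)
        = patMerge c (c :: t) (patGo ((c :: t).filter (fun ch => ch ≠ c))) := by
      rw [patGo]
    rw [hgo, hfl, hsub, ← hfl, patMerge_map]
    refine List.map_congr_left ?_
    intro ch hch
    rw [hfl, dedup_cons]
    by_cases hx : ch = c
    · subst hx
      rw [if_pos rfl, rankIn, PySem.List.index?_cons_self]
      simp
    · have hmem : ch ∈ t.filter (fun ch => ch ≠ c) := by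
        rcases List.mem_cons.mp hch with h | h
        · exact absurd h hx
        · exact List.mem_filter.mpr ⟨h, by simp [hx]⟩
      have hmemd : ch ∈ PySem.List.dedup (t.filter (fun ch => ch ≠ c)) :=
        (PySem.List.mem_dedup _ _).mpr hmem
      obtain ⟨r, hr⟩ : ∃ r, PySem.List.index? (PySem.List.dedup (t.filter (fun ch => ch ≠ c))) ch = some r :=
        Option.isSome_iff_exists.mp ((PySem.List.index?_isSome_iff _ ch).mpr hmemd)
      have hne : c ≠ ch := fun h => hx h.symm
      rw [if_neg hx, rankIn, rankIn, PySem.List.index?_cons_of_ne _ hne, hr]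
      simp only [Option.map_some, Option.getD_some]
      push_cast
      ring

lemma pat_alt_eq (s : String) :
    pat_alt s = s.toList.map (rankIn (PySem.List.dedup s.toList)) := patGo_eq s.toList

-- ===== VERDICT (by name: the statement is the Claim_ definition above) =====
theorem pat_spec : Claim_equal_pat := by
  intro s _
  unfold Spec_pat
  rw [pat_eq, pat_alt_eq]
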